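-- pv_equiv track=rewrite | github.com/Arsen1302/Code-copy-detector | TestData/solutions/problem_1561_4.py | solution_1561_4
-- ===== SOURCE A (Python) =====
-- def solution_1561_4(num: str) -> str:
--     ss = 0
--     res=''
--     for i in set(num):
--         if i*3 in num:
--             if ss <= int(i):
--                 ss = int(i)
--                 res=i*3
--     return res
-- ===== SOURCE B (Python) =====
-- def solution_1561_4(num: str) -> str:
--     for d in range(9, -1, -1):
--         t = str(d) * 3
--         if t in num:
--             return t
--     return ''
-- ===== Notes on version B (the rewrite author's own statement) =====
-- stated objective: idiomatic
-- what changed: B replaces A's set-iteration with running max/tie-break bookkeeping by a single descending scan over the ten digits 9..0, returning the first digit whose tripled string occurs in num.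
import Mathlib
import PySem

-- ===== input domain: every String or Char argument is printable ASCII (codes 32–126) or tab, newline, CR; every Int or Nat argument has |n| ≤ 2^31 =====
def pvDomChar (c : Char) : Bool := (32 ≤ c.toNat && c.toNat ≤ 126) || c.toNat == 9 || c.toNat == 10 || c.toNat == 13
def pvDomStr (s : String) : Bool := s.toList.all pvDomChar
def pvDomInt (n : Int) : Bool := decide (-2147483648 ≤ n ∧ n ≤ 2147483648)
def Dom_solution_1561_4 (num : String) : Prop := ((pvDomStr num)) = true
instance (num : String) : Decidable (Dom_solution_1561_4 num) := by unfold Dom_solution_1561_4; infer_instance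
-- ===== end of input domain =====

-- B replaces A's set-iteration with running-max bookkeeping by a descending scan over the ten
-- digits 9..0 that returns the first tripled digit found (objective: idiomatic).

-- ===== PORT A =====
-- A's loop body over set(num): if i*3 in num, compute int(i) and update (ss, res) when ss <= int(i).
def pvStepA (num : List Char) (st : Int × List Char) (i : Char) : Int × List Char :=
  if PySem.Chars.isIn [i, i, i] num then
    if st.1 ≤ (PySem.Int.ofChars? [i]).getD 0 then
      ((PySem.Int.ofChars? [i]).getD 0, [i, i, i])
    else st
  else st

def solution_1561_4 (num : String) : String :=
  String.ofList (((PySem.Set.ofList num.toList).foldl (pvStepA num.toList) (0, [])).2)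

-- ===== PORT B =====
-- str(d)*3 for the current candidate digit d
def pvTriple (d : Int) : List Char :=
  PySem.Int.toChars d ++ PySem.Int.toChars d ++ PySem.Int.toChars d

-- B's loop: for d in range(9, -1, -1): if str(d)*3 in num: return str(d)*3
def pvAltGo (num : List Char) : List Int → List Char
  | [] => []
  | d :: rest => if PySem.Chars.isIn (pvTriple d) num then pvTriple d else pvAltGo num rest

def solution_1561_4_alt (num : String) : String :=
  String.ofList (pvAltGo num.toList (PySem.List.pyRange 9 (-1) (-1)))

-- ===== PRECONDITION & SPEC =====
-- Pre_ excludes inputs where some NON-digit character occurs three times consecutively: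
-- there A raises ValueError from int(i) and returns no value.
def Pre_solution_1561_4 (num : String) : Prop :=
  (num.toList.all (fun c => !PySem.Chars.isIn [c, c, c] num.toList || c.isDigit)) = true
instance (num : String) : Decidable (Pre_solution_1561_4 num) := by
  unfold Pre_solution_1561_4; infer_instance
def pvWitness_solution_1561_4 : String := "2333 41"

def Spec_solution_1561_4 (num : String) (out : String) : Prop := out = solution_1561_4_alt num
instance (num : String) (out : String) : Decidable (Spec_solution_1561_4 num out) := by
  unfold Spec_solution_1561_4; infer_instance

-- ===== CLAIM (what is proved, stated in full; the proofs are below) =====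
def Claim_equal_solution_1561_4 : Prop := ∀ (num : String), Dom_solution_1561_4 num → Pre_solution_1561_4 num → Spec_solution_1561_4 num (solution_1561_4 num)

-- ===== LEMMAS AND PROOFS =====

def pvDigits : List Char := ['0','1','2','3','4','5','6','7','8','9']

def pvVal (c : Char) : Int := (PySem.Int.ofChars? [c]).getD 0

-- the running maximum A's fold tracks: max tripled-digit value over l (0 if none)
def pvMv (num l : List Char) : Int :=
  ((l.filter (fun c => PySem.Chars.isIn [c, c, c] num)).map pvVal).foldl max 0

lemma pv_digit_mem {c : Char} (h : c.isDigit = true) : c ∈ pvDigits := by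
  have hb : 48 ≤ c.toNat ∧ c.toNat ≤ 57 := by
    simp only [Char.isDigit, decide_eq_true_eq, Bool.and_eq_true] at h
    exact h
  have hc : Char.ofNat c.toNat = c := Char.ofNat_toNat c
  obtain ⟨h1, h2⟩ := hb
  interval_cases h' : c.toNat <;> · rw [← hc]; decide

lemma pv_foldl_max_eq (vs : List Int) (d : Int) :
    ∀ i : Int, i ≤ d → (∀ v ∈ vs, v ≤ d) → (d ∈ vs ∨ i = d) → vs.foldl max i = d := by
  induction vs with
  | nil => intro i _ _ hm; simpa using hm
  | cons v vs ih =>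
    intro i hi hub hm
    simp only [List.foldl_cons]
    rcases hm with hm | hm
    · rcases List.mem_cons.mp hm with hv | hv
      · subst hv
        exact ih _ (max_le hi le_rfl) (fun w hw => hub w (List.mem_cons_of_mem _ hw))
          (Or.inr (max_eq_right hi))
      · exact ih _ (max_le hi (hub v (List.mem_cons_self))) (fun w hw => hub w (List.mem_cons_of_mem _ hw)) (Or.inl hv)
    · subst hm
      exact ih _ (max_le le_rfl (hub v (List.mem_cons_self))) (fun w hw => hub w (List.mem_cons_of_mem _ hw))
        (Or.inr (max_eq_left (hub v (List.mem_cons_self))))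

-- A's fold computes the max tripled-digit value and its triple.
lemma pv_foldA_char (num : List Char) (l : List Char)
    (hl : ∀ c ∈ l, PySem.Chars.isIn [c, c, c] num = true → c.isDigit = true) :
    l.foldl (pvStepA num) (0, []) =
      if (l.filter (fun c => PySem.Chars.isIn [c, c, c] num)) = []
      then ((0 : Int), ([] : List Char))
      else (pvMv num l, pvTriple (pvMv num l)) := by
  induction l using List.reverseRecOn with
  | nil => simp
  | append_singleton l c ih =>
    have hl' : ∀ x ∈ l, PySem.Chars.isIn [x, x, x] num = true → x.isDigit = true :=
      fun x hx => hl x (List.mem_append_left _ hx)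
    rw [List.foldl_append, ih hl']
    simp only [List.foldl_cons, List.foldl_nil]
    by_cases hD : PySem.Chars.isIn [c, c, c] num = true
    · have hdig : c.isDigit = true := hl c (List.mem_append_right _ (List.mem_cons_self)) hD
      have hmem := pv_digit_mem hdig
      have hval : 0 ≤ pvVal c ∧ pvVal c ≤ 9 ∧ pvTriple (pvVal c) = [c, c, c] := by
        fin_cases hmem <;> exact ⟨by decide, by decide, by decide⟩
      have hfil : (l ++ [c]).filter (fun c => PySem.Chars.isIn [c, c, c] num)
          = l.filter (fun c => PySem.Chars.isIn [c, c, c] num) ++ [c] := by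
        simp [List.filter_append, hD]
      have hMv : pvMv num (l ++ [c]) = max (pvMv num l) (pvVal c) := by
        simp only [pvMv, hfil, List.map_append, List.foldl_append]
        simp [pvVal]
      by_cases hemp : (l.filter (fun c => PySem.Chars.isIn [c, c, c] num)) = []
      · have hM0 : pvMv num l = 0 := by simp [pvMv, hemp]
        rw [if_pos hemp, if_neg (by rw [hfil, hemp]; simp)]
        simp only [pvStepA, hD, if_true]
        rw [if_pos (by simpa [pvVal] using hval.1)]
        rw [hMv, hM0, max_eq_right hval.1, hval.2.2]
        rfl
      · rw [if_neg hemp, if_neg (by rw [hfil]; simp)]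
        simp only [pvStepA, hD, if_true]
        by_cases hle : pvMv num l ≤ pvVal c
        · rw [if_pos (by simpa [pvVal] using hle), hMv, max_eq_right hle, hval.2.2]
          rfl
        · rw [if_neg (by simpa [pvVal] using hle), hMv, max_eq_left ((not_le.mp hle).le)]
    · have hDf : PySem.Chars.isIn [c, c, c] num = false := by simpa using hD
      have hfil : (l ++ [c]).filter (fun c => PySem.Chars.isIn [c, c, c] num)
          = l.filter (fun c => PySem.Chars.isIn [c, c, c] num) := by
        simp [List.filter_append, hDf]
      have hMveq : pvMv num (l ++ [c]) = pvMv num l := by simp [pvMv, hfil]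
      simp only [pvStepA, hDf, Bool.false_eq_true, if_false, hfil, hMveq]

-- B's scan is find? over the digit list.
lemma pv_altGo_find (num : List Char) (ds : List Int) :
    pvAltGo num ds =
      match ds.find? (fun d => PySem.Chars.isIn (pvTriple d) num) with
      | some d => pvTriple d
      | none => [] := by
  induction ds with
  | nil => simp [pvAltGo]
  | cons d rest ih =>
    by_cases h : PySem.Chars.isIn (pvTriple d) num = true
    · simp [pvAltGo, h]
    · rw [List.find?_cons_of_neg (by simpa using h)]
      simpa [pvAltGo, h] using ih

-- On a strictly descending list, find? returns an upper bound of the satisfying elements.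
lemma pv_find_desc_max {p : Int → Bool} : ∀ {l : List Int}, l.Pairwise (· > ·) →
    ∀ {d : Int}, l.find? p = some d → ∀ e ∈ l, p e = true → e ≤ d := by
  intro l
  induction l with
  | nil => intro _ d h; simp at h
  | cons a l ih =>
    intro hp d hf e he hpe
    rcases List.pairwise_cons.mp hp with ⟨ha, hl⟩
    by_cases hpa : p a = true
    · rw [List.find?_cons_of_pos hpa] at hf
      obtain rfl : a = d := by injection hf
      rcases List.mem_cons.mp he with rfl | he'
      · exact le_rfl
      · exact le_of_lt (ha e he')
    · rw [List.find?_cons_of_neg (by simpa using hpa)] at hf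
      rcases List.mem_cons.mp he with rfl | he'
      · exact absurd hpe hpa
      · exact ih hl hf e he' hpe

lemma pv_mem_of_trip {c : Char} {num : List Char}
    (h : PySem.Chars.isIn [c, c, c] num = true) : c ∈ num := by
  have hinf := (PySem.Chars.isIn_iff_infix _ _).mp h
  exact hinf.subset (by simp)

-- ===== VERDICT (by name: the statement is the Claim_ definition above) =====
theorem solution_1561_4_spec : Claim_equal_solution_1561_4 := by
  intro num _ hPre0
  unfold Spec_solution_1561_4
  unfold Pre_solution_1561_4 at hPre0
  have hPre : ∀ c ∈ num.toList, PySem.Chars.isIn [c, c, c] num.toList = true → c.isDigit = true := by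
    intro c hc hin
    have := List.all_eq_true.mp hPre0 c hc
    simpa [hin] using this
  unfold solution_1561_4 solution_1561_4_alt
  set s := num.toList with hs
  have hPre' : ∀ c ∈ PySem.Set.ofList s, PySem.Chars.isIn [c, c, c] s = true → c.isDigit = true :=
    fun c hc => hPre c ((PySem.Set.mem_ofList _ _).mp hc)
  rw [pv_foldA_char s _ hPre', pv_altGo_find]
  have hrange : PySem.List.pyRange 9 (-1) (-1) = [9,8,7,6,5,4,3,2,1,0] := by decide
  rw [hrange]
  rcases hfind : ([9,8,7,6,5,4,3,2,1,0] : List Int).find?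
      (fun d => PySem.Chars.isIn (pvTriple d) s) with _ | d
  · have hnone := List.find?_eq_none.mp hfind
    have hemp : (PySem.Set.ofList s).filter (fun c => PySem.Chars.isIn [c, c, c] s) = [] := by
      rw [List.filter_eq_nil_iff]
      intro c hc
      by_contra hD
      have hD' : PySem.Chars.isIn [c, c, c] s = true := by simpa using hD
      have hmem := pv_digit_mem (hPre' c hc hD')
      have hfact : pvVal c ∈ ([9,8,7,6,5,4,3,2,1,0] : List Int) ∧ pvTriple (pvVal c) = [c, c, c] := by
        fin_cases hmem <;> exact ⟨by decide, by decide⟩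
      exact absurd (hnone (pvVal c) hfact.1) (by simp [hfact.2, hD'])
    simp [hemp]
  · have hd := List.find?_some hfind
    have hdmem := List.mem_of_find?_eq_some hfind
    have hc0 : ∃ c ∈ pvDigits, pvTriple d = [c, c, c] ∧ pvVal c = d := by
      fin_cases hdmem
      exacts [⟨'9', by decide, by decide, by decide⟩, ⟨'8', by decide, by decide, by decide⟩,
        ⟨'7', by decide, by decide, by decide⟩, ⟨'6', by decide, by decide, by decide⟩,
        ⟨'5', by decide, by decide, by decide⟩, ⟨'4', by decide, by decide, by decide⟩,
        ⟨'3', by decide, by decide, by decide⟩, ⟨'2', by decide, by decide, by decide⟩,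
        ⟨'1', by decide, by decide, by decide⟩, ⟨'0', by decide, by decide, by decide⟩]
    obtain ⟨c0, _, htrip0, hval0⟩ := hc0
    have hD0 : PySem.Chars.isIn [c0, c0, c0] s = true := by rw [← htrip0]; exact hd
    have hc0fil : c0 ∈ (PySem.Set.ofList s).filter (fun c => PySem.Chars.isIn [c, c, c] s) :=
      List.mem_filter.mpr ⟨(PySem.Set.mem_ofList _ _).mpr (pv_mem_of_trip hD0), by simpa using hD0⟩
    have hemp : ¬ ((PySem.Set.ofList s).filter (fun c => PySem.Chars.isIn [c, c, c] s) = []) := by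
      intro h; rw [h] at hc0fil; exact absurd hc0fil (List.not_mem_nil)
    have hub : ∀ v ∈ ((PySem.Set.ofList s).filter
        (fun c => PySem.Chars.isIn [c, c, c] s)).map pvVal, v ≤ d := by
      intro v hv
      obtain ⟨c, hcfil, rfl⟩ := List.mem_map.mp hv
      obtain ⟨hcS, hcD⟩ := List.mem_filter.mp hcfil
      have hcD' : PySem.Chars.isIn [c, c, c] s = true := by simpa using hcD
      have hmem := pv_digit_mem (hPre' c hcS hcD')
      have hfacts : pvVal c ∈ ([9,8,7,6,5,4,3,2,1,0] : List Int) ∧ pvTriple (pvVal c) = [c, c, c] := by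
        fin_cases hmem <;> exact ⟨by decide, by decide⟩
      exact pv_find_desc_max (by decide) hfind (pvVal c) hfacts.1 (by simp [hfacts.2, hcD'])
    have hd0 : (0 : Int) ≤ d := by
      rw [← hval0]
      have := pv_digit_mem (hPre' c0 (List.mem_filter.mp hc0fil).1 hD0)
      fin_cases this <;> decide
    have hMv : pvMv s (PySem.Set.ofList s) = d := by
      unfold pvMv
      exact pv_foldl_max_eq _ d 0 hd0 hub (Or.inl (List.mem_map.mpr ⟨c0, hc0fil, hval0⟩))
    rw [if_neg hemp, hMv]
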